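-- pv_equiv track=rewrite | github.com/DancingOnAir/LeetcodePythonSolution | TwoPointers/SlidingWindow/2653_sliding_subarray_beauty.py | getSubarrayBeauty
-- ===== SOURCE A (Python) =====
-- from typing import List
--
-- def getSubarrayBeauty(nums: List[int], k: int, x: int) -> List[int]:
--     cnt = [0] * 50
--     res = [0] * (len(nums) - k + 1)
--     for i, val in enumerate(nums):
--         if val < 0:
--             cnt[val + 50] += 1
--         if i - k >= 0 and nums[i - k] < 0:
--             cnt[nums[i - k] + 50] -= 1
--         if i - k + 1 < 0:
--             continue
--
--         tot = 0
--         for j in range(50):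
--             tot += cnt[j]
--             if tot >= x:
--                 res[i - k + 1] = j - 50
--                 break
--     return res
-- ===== SOURCE B (Python) =====
-- def getSubarrayBeauty(nums, k, x):
--     res = []
--     for i in range(len(nums) - k + 1):
--         negs = sorted(v for v in nums[i:i + k] if v < 0)
--         res.append(negs[x - 1] if len(negs) >= x else 0)
--     return res
-- ===== Notes on version B (the rewrite author's own statement) =====
-- stated objective: simpler
-- what changed: Replaces the incrementally maintained 50-bucket histogram with prefix-sum rank scan by a per-window recompute (slice, sort the negatives, take the (x-1)-th or 0); Pre_ keeps the histogram's natural domain: it excludes x <= 0 (where A's rank scan breaks at the first bucket, an accident), k < 0 on nonempty input and elements below -100 (A raises IndexError there), and elements in [-100,-51], where A's negative bucket index wraps around and files the value in the wrong bucket, an artefact of A's implementation.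
-- outside the precondition, e.g. on getSubarrayBeauty([1], 1, 0): A returns [-50], B raises IndexError; on getSubarrayBeauty([-5, 3], 2, 0): A returns [-50], B returns [-5]; on getSubarrayBeauty([-60], 1, 1): A returns [-10], B returns [-60]
import Mathlib
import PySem

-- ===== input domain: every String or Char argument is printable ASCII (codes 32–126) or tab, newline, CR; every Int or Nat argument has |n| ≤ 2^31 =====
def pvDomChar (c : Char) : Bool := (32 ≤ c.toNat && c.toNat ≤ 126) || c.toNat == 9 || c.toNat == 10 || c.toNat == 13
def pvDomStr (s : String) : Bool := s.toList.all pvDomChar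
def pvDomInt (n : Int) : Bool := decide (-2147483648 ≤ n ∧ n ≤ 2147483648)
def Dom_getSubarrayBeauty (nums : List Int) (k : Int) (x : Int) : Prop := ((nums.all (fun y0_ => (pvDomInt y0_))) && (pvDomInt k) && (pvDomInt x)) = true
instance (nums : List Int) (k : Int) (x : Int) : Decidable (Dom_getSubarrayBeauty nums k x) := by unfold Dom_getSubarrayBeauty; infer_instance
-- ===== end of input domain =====

-- B replaces A's incrementally maintained 50-bucket negative-value histogram (and its prefix-sum
-- rank scan) by a per-window recompute: slice the window, sort its negative elements, pick the
-- (x-1)-th element or 0.  Objective: simpler.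

-- ===== PORT A =====
def bumpA (cnt : List Int) (i d : Int) : List Int :=
  if i < 0 then cnt.set (i + cnt.length).toNat (cnt.getD (i + cnt.length).toNat 0 + d)
  else cnt.set i.toNat (cnt.getD i.toNat 0 + d)

def innerGoA (cs : List Int) (j tot x : Int) : Option Int :=
  match cs with
  | [] => none
  | c :: t => if x ≤ tot + c then some (j - 50) else innerGoA t (j + 1) (tot + c) x

def bodyA (nums : List Int) (k x : Int) (st : List Int × List Int) (p : Int × Int) : List Int × List Int :=
  let i := p.1
  let val := p.2
  let cnt1 := if val < 0 then bumpA st.1 (val + 50) 1 else st.1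
  let cnt2 := if 0 ≤ i - k ∧ PySem.List.pyGetD nums (i - k) 0 < 0 then
      bumpA cnt1 (PySem.List.pyGetD nums (i - k) 0 + 50) (-1) else cnt1
  if i - k + 1 < 0 then (cnt2, st.2)
  else match innerGoA cnt2 0 0 x with
    | some v => (cnt2, st.2.set (i - k + 1).toNat v)
    | none => (cnt2, st.2)

def getSubarrayBeauty (nums : List Int) (k : Int) (x : Int) : List Int :=
  ((PySem.List.enumerate nums).foldl (bodyA nums k x)
    (List.replicate 50 0, List.replicate ((nums.length : Int) - k + 1).toNat 0)).2

-- ===== PORT B =====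
def getSubarrayBeauty_alt (nums : List Int) (k : Int) (x : Int) : List Int :=
  (PySem.List.pyRange 0 ((nums.length : Int) - k + 1) 1).map (fun i =>
    let negs := PySem.List.sorted ((PySem.List.slice nums (some i) (some (i + k))).filter
        (fun v => decide (v < 0))) (fun v => v) false
    if x ≤ (negs.length : Int) then PySem.List.pyGetD negs (x - 1) 0 else 0)

-- ===== PRECONDITION & SPEC =====
-- Pre_ keeps the 50-bucket histogram's natural domain, on which A is sensible: it excludes
-- elements below -100 and k < 0 on nonempty input (A raises IndexError), elements in
-- [-100,-51] (A's negative bucket index wraps around and files the value in the wrong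
-- bucket, an artefact of A's implementation), and x <= 0 with at least one window (A's
-- rank scan then breaks at the first bucket, an accident); B does the natural thing there.
def Pre_getSubarrayBeauty (nums : List Int) (k : Int) (x : Int) : Prop :=
  (1 ≤ x ∨ (nums.length : Int) < k) ∧ (0 ≤ k ∨ nums = []) ∧ ∀ v ∈ nums, -50 ≤ v
instance (nums : List Int) (k : Int) (x : Int) : Decidable (Pre_getSubarrayBeauty nums k x) := by
  unfold Pre_getSubarrayBeauty; infer_instance

def pvWitness_getSubarrayBeauty : List Int × Int × Int := ([-3, 1, -2], 2, 1)

def Spec_getSubarrayBeauty (nums : List Int) (k : Int) (x : Int) (out : List Int) : Prop := out = getSubarrayBeauty_alt nums k x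
instance (nums : List Int) (k : Int) (x : Int) (out : List Int) : Decidable (Spec_getSubarrayBeauty nums k x out) := by unfold Spec_getSubarrayBeauty; infer_instance

-- ===== CLAIM (what is proved, stated in full; the proofs are below) =====
def Claim_equal_getSubarrayBeauty : Prop := ∀ (nums : List Int) (k : Int) (x : Int), Dom_getSubarrayBeauty nums k x → Pre_getSubarrayBeauty nums k x → Spec_getSubarrayBeauty nums k x (getSubarrayBeauty nums k x)

-- ===== LEMMAS AND PROOFS =====
def cle (s : List Int) (t : Int) : Int := (s.countP (fun v => decide (v ≤ t)) : Int)

def negsS (w : List Int) : List Int :=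
  PySem.List.sorted (w.filter (fun v => decide (v < 0))) (fun v => v) false

lemma cle_split (s : List Int) (t : Int) : cle s t = cle s (t - 1) + (s.count t : Int) := by
  induction s with
  | nil => simp [cle]
  | cons a s ih =>
    simp only [cle, List.countP_cons, List.count_cons] at *
    by_cases h1 : a ≤ t - 1 <;> by_cases h2 : a = t <;> by_cases h3 : a ≤ t <;>
      simp_all <;> omega

lemma cle_mono (s : List Int) {t t' : Int} (h : t ≤ t') : cle s t ≤ cle s t' := by
  unfold cle
  have := List.countP_mono_left (l := s) (p := fun v => decide (v ≤ t)) (q := fun v => decide (v ≤ t'))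
    (by intro a _ ha; simp at ha ⊢; omega)
  exact_mod_cast this

lemma cle_le_length (s : List Int) (t : Int) : cle s t ≤ (s.length : Int) := by
  unfold cle; exact_mod_cast List.countP_le_length

lemma cle_rank_iff (s : List Int)
    (mono : ∀ (i j : Nat) (hij : i ≤ j) (hj : j < s.length), s[i]'(by omega) ≤ s[j])
    (p : Nat) (hp : p < s.length) (t : Int) :
    ((p : Int) + 1 ≤ cle s t) ↔ s[p] ≤ t := by
  have hsplit1 : s.countP (fun v => decide (v ≤ t)) =
      (s.take p).countP (fun v => decide (v ≤ t)) + (s.drop p).countP (fun v => decide (v ≤ t)) := by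
    rw [← List.countP_append, List.take_append_drop]
  have hsplit2 : s.countP (fun v => decide (v ≤ t)) =
      (s.take (p+1)).countP (fun v => decide (v ≤ t)) + (s.drop (p+1)).countP (fun v => decide (v ≤ t)) := by
    rw [← List.countP_append, List.take_append_drop]
  unfold cle
  constructor
  · intro h
    by_contra hgt
    rw [not_le] at hgt
    have hdrop : (s.drop p).countP (fun v => decide (v ≤ t)) = 0 := by
      rw [List.countP_eq_zero]
      intro v hv
      rw [List.mem_iff_getElem] at hv
      obtain ⟨i, hi, rfl⟩ := hv
      have hlen : p + i < s.length := by
        simp only [List.length_drop] at hi; omega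
      rw [List.getElem_drop]
      have hmono := mono p (p + i) (by omega) hlen
      simp only [decide_eq_true_eq]; omega
    have htake : (s.take p).countP (fun v => decide (v ≤ t)) ≤ p := by
      calc (s.take p).countP (fun v => decide (v ≤ t)) ≤ (s.take p).length := List.countP_le_length
        _ ≤ p := by simp
    omega
  · intro h
    have htake : (s.take (p+1)).countP (fun v => decide (v ≤ t)) = p + 1 := by
      have hall : ∀ v ∈ s.take (p+1), (fun v => decide (v ≤ t)) v = true := by
        intro v hv
        rw [List.mem_iff_getElem] at hv
        obtain ⟨i, hi, rfl⟩ := hv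
        have hi' : i < p + 1 := by simp only [List.length_take] at hi; omega
        rw [List.getElem_take]
        have hmono := mono i p (by omega) hp
        simp only [decide_eq_true_eq]; omega
      calc (s.take (p+1)).countP (fun v => decide (v ≤ t)) = (s.take (p+1)).length :=
            List.countP_eq_length.mpr hall
        _ = p + 1 := by simp only [List.length_take]; omega
    omega

lemma sorted_rank_iff (l : List Int) (p : Nat)
    (hp : p < (PySem.List.sorted l (fun v => v) false).length) (t : Int) :
    ((p : Int) + 1 ≤ cle (PySem.List.sorted l (fun v => v) false) t) ↔
      (PySem.List.sorted l (fun v => v) false)[p] ≤ t := by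
  refine cle_rank_iff _ ?_ p hp t
  intro i j hij hj
  exact PySem.List.sorted_id_getElem_mono l hij hj

lemma count_negsS (w : List Int) (c : Int) (hc : c < 0) : (negsS w).count c = w.count c := by
  unfold negsS
  rw [(PySem.List.sorted_perm _ _ _).count_eq, List.count_filter]
  simp [hc]

lemma negsS_rank_iff (w : List Int) (p : Nat) (hp : p < (negsS w).length) (t : Int) :
    ((p : Int) + 1 ≤ cle (negsS w) t) ↔ (negsS w)[p] ≤ t :=
  sorted_rank_iff _ p hp t

lemma scanA (w : List Int) (x : Int) :
    ∀ (n : Nat), ∀ (a : Nat) (tot : Int), a + n = 50 →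
      tot = cle (negsS w) ((a : Int) - 51) → tot < x →
      innerGoA ((List.range' a n).map (fun (j : Nat) => (w.count ((j : Int) - 50) : Int))) a tot x
        = if x ≤ cle (negsS w) ((a : Int) + n - 51) then some ((negsS w).getD (x - 1).toNat 0) else none := by
  intro n
  induction n with
  | zero =>
    intro a tot h50 htot hlt
    simp only [List.range'_zero, List.map_nil]
    unfold innerGoA
    rw [show ((a : Int) + ((0 : Nat) : Int) - 51) = (a : Int) - 51 by push_cast; ring]
    rw [if_neg (by omega)]
  | succ n ih =>
    intro a tot h50 htot hlt
    rw [List.range'_succ, List.map_cons]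
    unfold innerGoA
    have ha49 : a ≤ 49 := by omega
    have hcnt : (w.count ((a : Int) - 50) : Int) = cle (negsS w) ((a : Int) - 50) - cle (negsS w) ((a : Int) - 51) := by
      have := cle_split (negsS w) ((a : Int) - 50)
      rw [count_negsS w _ (by omega)] at this
      have harg : (a : Int) - 50 - 1 = (a : Int) - 51 := by ring
      rw [harg] at this
      omega
    have hmono : cle (negsS w) ((a : Int) - 50) ≤ cle (negsS w) ((a : Int) + ((n + 1 : Nat) : Int) - 51) := by
      apply cle_mono; push_cast; omega
    by_cases hbr : x ≤ tot + (w.count ((a : Int) - 50) : Int)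
    · rw [if_pos hbr, if_pos (by omega)]
      -- the x-th smallest is exactly a - 50
      have hx1 : 1 ≤ x := by
        have := cle_le_length (negsS w) ((a : Int) - 51)
        have h0 : 0 ≤ cle (negsS w) ((a : Int) - 51) := by
          unfold cle; positivity
        omega
      set p : Nat := (x - 1).toNat with hpdef
      have hpx : (p : Int) + 1 = x := by omega
      have hplen : p < (negsS w).length := by
        have := cle_le_length (negsS w) ((a : Int) - 50)
        omega
      have h1 : (negsS w)[p] ≤ (a : Int) - 50 := by
        rw [← negsS_rank_iff w p hplen]
        omega
      have h2 : ¬ ((negsS w)[p] ≤ (a : Int) - 51) := by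
        rw [← negsS_rank_iff w p hplen]
        omega
      have hgd : (negsS w).getD p 0 = (negsS w)[p] := List.getD_eq_getElem _ _ hplen
      rw [hgd]
      congr 1
      omega
    · rw [if_neg hbr]
      have harg2 : ((a : Nat) + 1 : Nat) = a + 1 := rfl
      have := ih (a + 1) (tot + (w.count ((a : Int) - 50) : Int)) (by omega)
        (by push_cast; rw [htot, hcnt]; ring_nf) (by omega)
      push_cast at this ⊢
      rw [show ((a : Int) + 1 + n - 51) = ((a : Int) + (n + 1) - 51) by ring] at this
      rw [show ((a : Int) + 1) = ((a : Int) + 1) from rfl] at this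
      exact this

def hvec (w : List Int) : List Int := (List.range 50).map (fun (j : Nat) => ((w.count ((j : Int) - 50)) : Int))

def outA (w : List Int) (x : Int) : Int :=
  match innerGoA (hvec w) 0 0 x with
  | some v => v
  | none => 0

lemma cle_neg51 (w : List Int) (hw : ∀ v ∈ w, -50 ≤ v) : cle (negsS w) (-51) = 0 := by
  unfold cle
  rw [List.countP_eq_zero.mpr]
  · rfl
  · intro v hv
    unfold negsS at hv
    rw [PySem.List.mem_sorted, List.mem_filter] at hv
    have := hw v hv.1
    simpa using by omega

lemma cle_neg1 (w : List Int) : cle (negsS w) (-1) = ((negsS w).length : Int) := by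
  unfold cle
  congr 1
  apply List.countP_eq_length.mpr
  intro v hv
  unfold negsS at hv
  rw [PySem.List.mem_sorted, List.mem_filter] at hv
  have : v < 0 := by simpa using hv.2
  simpa using by omega

lemma innerA_eq (w : List Int) (x : Int) (hx : 1 ≤ x) (hw : ∀ v ∈ w, -50 ≤ v) :
    innerGoA (hvec w) 0 0 x =
      if x ≤ ((negsS w).length : Int) then some ((negsS w).getD (x - 1).toNat 0) else none := by
  have h1 : (0 : Nat) + 50 = 50 := by omega
  have h2 : (0 : Int) = cle (negsS w) (((0 : Nat) : Int) - 51) := by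
    rw [show ((0 : Nat) : Int) - 51 = (-51 : Int) by norm_num]
    exact (cle_neg51 w hw).symm
  have h3 : (0 : Int) < x := by omega
  have h := scanA w x 50 0 0 h1 h2 h3
  rw [show ((0 : Nat) : Int) + ((50 : Nat) : Int) - 51 = -1 by norm_num, cle_neg1 w] at h
  unfold hvec
  rw [List.range_eq_range']
  simpa using h

lemma outA_eq (w : List Int) (x : Int) (hx : 1 ≤ x) (hw : ∀ v ∈ w, -50 ≤ v) :
    outA w x = if x ≤ ((negsS w).length : Int) then PySem.List.pyGetD (negsS w) (x - 1) 0 else 0 := by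
  unfold outA
  rw [innerA_eq w x hx hw]
  by_cases hc : x ≤ ((negsS w).length : Int)
  · rw [if_pos hc, if_pos hc]
    have hlt : (x - 1).toNat < (negsS w).length := by omega
    show (negsS w).getD (x - 1).toNat 0 = _
    rw [PySem.List.pyGetD_eq_getElem (negsS w) 0 (by omega) (by omega)]
    rw [List.getD_eq_getElem _ _ hlt]
  · rw [if_neg hc, if_neg hc]

-- ==== outer layer ====

def ewnd (nums : List Int) (κ t : Nat) : List Int := (nums.take t).drop (t - κ)

lemma set_map_range (n : Nat) (f : Nat → Int) (m : Nat) (y : Int) :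
    ((List.range n).map f).set m y = (List.range n).map (fun j => if j = m then y else f j) := by
  apply List.ext_getElem
  · simp
  · intro i h1 h2
    simp only [List.getElem_set, List.getElem_map, List.getElem_range]
    by_cases him : m = i
    · subst him; simp
    · rw [if_neg him, if_neg (fun h => him h.symm)]

lemma bumpA_map_range (f : Nat → Int) (i d : Int) (h0 : -50 ≤ i) (h1 : i < 50) :
    bumpA ((List.range 50).map f) i d
      = (List.range 50).map (fun (j : Nat) =>
          if (j : Int) = (if i < 0 then i + 50 else i) then f j + d else f j) := by
  unfold bumpA
  simp only [List.length_map, List.length_range, Nat.cast_ofNat]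
  by_cases hi : i < 0
  · rw [if_pos hi]
    rw [PySem.List.getD_map_range f 50 (i + 50).toNat 0 (by omega)]
    rw [set_map_range 50 f (i + 50).toNat _]
    apply List.map_congr_left
    intro j hj
    rw [if_pos hi]
    by_cases hji : j = (i + 50).toNat
    · subst hji; rw [if_pos rfl, if_pos (by omega)]
    · rw [if_neg hji, if_neg (by omega)]
  · rw [if_neg hi]
    rw [PySem.List.getD_map_range f 50 i.toNat 0 (by omega)]
    rw [set_map_range 50 f i.toNat _]
    apply List.map_congr_left
    intro j hj
    rw [if_neg hi]
    by_cases hji : j = i.toNat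
    · subst hji; rw [if_pos rfl, if_pos (by omega)]
    · rw [if_neg hji, if_neg (by omega)]

lemma ewnd_kzero (nums : List Int) (s : Nat) : ewnd nums 0 s = [] := by
  unfold ewnd
  rw [Nat.sub_zero, List.drop_take]
  simp

lemma ewnd_succ_small (nums : List Int) (κ t : Nat) (h : t < κ) (ht : t < nums.length) :
    ewnd nums κ (t + 1) = ewnd nums κ t ++ [nums[t]] := by
  unfold ewnd
  rw [Nat.sub_eq_zero_of_le (by omega), Nat.sub_eq_zero_of_le (by omega)]
  simp only [List.drop_zero]
  rw [List.take_add_one, List.getElem?_eq_getElem ht]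
  rfl

lemma ewnd_succ_big_old (nums : List Int) (κ t : Nat) (h1 : 1 ≤ κ) (h2 : κ ≤ t) (ht : t < nums.length) :
    ewnd nums κ t = nums[t - κ]'(by omega) :: ((nums.take t).drop (t - κ + 1)) := by
  unfold ewnd
  rw [List.drop_eq_getElem_cons (by simp; omega)]
  congr 1
  rw [List.getElem_take]

lemma ewnd_succ_big_new (nums : List Int) (κ t : Nat) (h1 : 1 ≤ κ) (h2 : κ ≤ t) (ht : t < nums.length) :
    ewnd nums κ (t + 1) = ((nums.take t).drop (t - κ + 1)) ++ [nums[t]] := by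
  unfold ewnd
  rw [List.take_add_one, List.getElem?_eq_getElem ht]
  rw [show t + 1 - κ = (t - κ) + 1 by omega]
  rw [List.drop_append_of_le_length (by simp; omega)]
  rfl

lemma toNat_sub_cast (t κ : Nat) (h : κ ≤ t) : ((t : Int) - (κ : Int)).toNat = t - κ := by omega

lemma cnt_step (nums : List Int) (κ t : Nat) (ht : t < nums.length)
    (hvals : ∀ v ∈ nums, -50 ≤ v) :
    (if 0 ≤ (t : Int) - (κ : Int) ∧ PySem.List.pyGetD nums ((t : Int) - (κ : Int)) 0 < 0 then
        bumpA (if nums[t] < 0 then bumpA (hvec (ewnd nums κ t)) (nums[t] + 50) 1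
               else hvec (ewnd nums κ t))
          (PySem.List.pyGetD nums ((t : Int) - (κ : Int)) 0 + 50) (-1)
      else (if nums[t] < 0 then bumpA (hvec (ewnd nums κ t)) (nums[t] + 50) 1
            else hvec (ewnd nums κ t)))
    = hvec (ewnd nums κ (t + 1)) := by
  have hval50 : -50 ≤ nums[t] := hvals _ (List.getElem_mem ht)
  by_cases hκt : (κ : Nat) ≤ t
  · -- removal index in range: pyGetD is nums[t-κ]
    have hrem : PySem.List.pyGetD nums ((t : Int) - (κ : Int)) 0 = nums[t - κ]'(by omega) := by
      rw [PySem.List.pyGetD_eq_getElem nums 0 (by omega) (by omega)]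
      congr 1
      exact toNat_sub_cast t κ hκt
    have hrem50 : -50 ≤ nums[t - κ]'(by omega) := hvals _ (List.getElem_mem (by omega))
    rw [hrem]
    by_cases hκ0 : κ = 0
    · -- empty window: the two updates hit the same bucket and cancel (or neither fires)
      subst hκ0
      simp only [Nat.sub_zero] at *
      rw [ewnd_kzero, ewnd_kzero]
      by_cases hv : nums[t] < 0
      · rw [if_pos hv, if_pos ⟨by omega, hv⟩]
        unfold hvec
        rw [bumpA_map_range _ _ _ (by omega) (by omega)]
        rw [bumpA_map_range _ _ _ (by omega) (by omega)]
        apply List.map_congr_left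
        intro j hj
        split_ifs <;> omega
      · rw [if_neg hv, if_neg (fun h => hv h.2)]
    · -- sliding window: drop nums[t-κ], append nums[t]
      have hκ1 : 1 ≤ κ := by omega
      rw [ewnd_succ_big_old nums κ t hκ1 hκt ht]
      rw [ewnd_succ_big_new nums κ t hκ1 hκt ht]
      have hcnt0 : hvec ((nums[t - κ]'(by omega)) :: ((nums.take t).drop (t - κ + 1)))
          = (List.range 50).map (fun (j : Nat) =>
              (((nums.take t).drop (t - κ + 1)).count ((j : Int) - 50) : Int)
                + (if (nums[t - κ]'(by omega)) = (j : Int) - 50 then 1 else 0)) := by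
        unfold hvec
        apply List.map_congr_left
        intro j hj
        rw [List.count_cons]
        by_cases h : (nums[t - κ]'(by omega)) = (j : Int) - 50
        · simp [h]
        · rw [if_neg h, if_neg (by simp [beq_iff_eq]; omega)]
          push_cast; ring
      have hcnt1 : hvec ((((nums.take t).drop (t - κ + 1))) ++ [nums[t]])
          = (List.range 50).map (fun (j : Nat) =>
              (((nums.take t).drop (t - κ + 1)).count ((j : Int) - 50) : Int)
                + (if nums[t] = (j : Int) - 50 then 1 else 0)) := by
        unfold hvec
        apply List.map_congr_left
        intro j hj
        rw [List.count_append]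
        by_cases h : nums[t] = (j : Int) - 50
        · simp [h]
        · rw [if_neg h]
          have hz : List.count ((j : Int) - 50) [nums[t]] = 0 := by
            simp [List.count_singleton]; omega
          rw [hz]
          push_cast; ring
      rw [hcnt0, hcnt1]
      by_cases hv : nums[t] < 0
      · rw [if_pos hv]
        rw [bumpA_map_range _ _ _ (by omega) (by omega)]
        by_cases hr : nums[t - κ]'(by omega) < 0
        · rw [if_pos ⟨by omega, hr⟩]
          rw [bumpA_map_range _ _ _ (by omega) (by omega)]
          apply List.map_congr_left
          intro j hj
          simp only [List.mem_range] at hj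
          split_ifs <;> omega
        · rw [if_neg (fun h => hr h.2)]
          apply List.map_congr_left
          intro j hj
          simp only [List.mem_range] at hj
          split_ifs <;> omega
      · rw [if_neg hv]
        by_cases hr : nums[t - κ]'(by omega) < 0
        · rw [if_pos ⟨by omega, hr⟩]
          rw [bumpA_map_range _ _ _ (by omega) (by omega)]
          apply List.map_congr_left
          intro j hj
          simp only [List.mem_range] at hj
          split_ifs <;> omega
        · rw [if_neg (fun h => hr h.2)]
          apply List.map_congr_left
          intro j hj
          simp only [List.mem_range] at hj
          split_ifs <;> omega
  · -- growing window: no removal yet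
    have hlt : t < κ := by omega
    rw [if_neg (fun h => absurd h.1 (by omega))]
    rw [ewnd_succ_small nums κ t hlt ht]
    have hcnt1 : hvec ((ewnd nums κ t) ++ [nums[t]])
        = (List.range 50).map (fun (j : Nat) =>
            ((ewnd nums κ t).count ((j : Int) - 50) : Int)
              + (if nums[t] = (j : Int) - 50 then 1 else 0)) := by
      unfold hvec
      apply List.map_congr_left
      intro j hj
      rw [List.count_append]
      by_cases h : nums[t] = (j : Int) - 50
      · simp [h]
      · rw [if_neg h]
        have hz : List.count ((j : Int) - 50) [nums[t]] = 0 := by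
          simp [List.count_singleton]; omega
        rw [hz]
        push_cast; ring
    rw [hcnt1]
    by_cases hv : nums[t] < 0
    · rw [if_pos hv]
      unfold hvec
      rw [bumpA_map_range _ _ _ (by omega) (by omega)]
      apply List.map_congr_left
      intro j hj
      simp only [List.mem_range] at hj
      split_ifs <;> omega
    · rw [if_neg hv]
      apply List.map_congr_left
      intro j hj
      simp only [List.mem_range] at hj
      split_ifs <;> omega

def valAt (nums : List Int) (κ : Nat) (x : Int) (m : Nat) : Int :=
  outA (ewnd nums κ (m + κ)) x

lemma enum_getElem? : ∀ (l : List Int) (s : Int) (i : Nat),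
    (PySem.List.enumerate l s)[i]? = l[i]?.map (fun a => (s + (i : Int), a)) := by
  intro l
  induction l with
  | nil => intro s i; simp [PySem.List.enumerate_nil]
  | cons a l ih =>
    intro s i
    rw [PySem.List.enumerate_cons]
    match i with
    | 0 => simp
    | Nat.succ i =>
      simp only [List.getElem?_cons_succ]
      rw [ih (s + 1) i]
      cases l[i]? with
      | none => rfl
      | some b =>
        simp only [Option.map_some]
        congr 2
        push_cast
        ring

lemma enum_take_succ (nums : List Int) (t : Nat) (ht : t < nums.length) :
    (PySem.List.enumerate nums 0).take (t + 1)
      = (PySem.List.enumerate nums 0).take t ++ [((t : Int), nums[t])] := by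
  rw [List.take_add_one]
  congr 1
  rw [enum_getElem?, List.getElem?_eq_getElem ht]
  simp

lemma hvec_nil : hvec [] = List.replicate 50 0 := by
  simp [hvec]

lemma negsS_nil : negsS ([] : List Int) = [] := rfl

lemma outA_nil (x : Int) (hx : 1 ≤ x) : outA [] x = 0 := by
  rw [outA_eq [] x hx (by simp)]
  rw [if_neg (by rw [negsS_nil]; simp; omega)]

lemma foldA_inv (nums : List Int) (κ : Nat) (x : Int) (hx : 1 ≤ x)
    (hvals : ∀ v ∈ nums, -50 ≤ v) (t : Nat) (ht : t ≤ nums.length) :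
    ((PySem.List.enumerate nums 0).take t).foldl (bodyA nums (κ : Int) x)
      (List.replicate 50 0, List.replicate ((nums.length : Int) - (κ : Int) + 1).toNat 0)
    = (hvec (ewnd nums κ t),
       (List.range ((nums.length : Int) - (κ : Int) + 1).toNat).map
         (fun m => if m + κ ≤ t then valAt nums κ x m else 0)) := by
  induction t with
  | zero =>
    simp only [List.take_zero, List.foldl_nil]
    rw [Prod.mk.injEq]
    constructor
    · rw [show ewnd nums κ 0 = [] by simp [ewnd], hvec_nil]
    · symm
      rw [List.eq_replicate_iff]
      refine ⟨by simp, ?_⟩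
      intro b hb
      rw [List.mem_map] at hb
      obtain ⟨m, hm, rfl⟩ := hb
      by_cases hc : m + κ ≤ 0
      · rw [if_pos hc]
        have hm0 : m = 0 := by omega
        have hκ0 : κ = 0 := by omega
        subst hm0; subst hκ0
        unfold valAt
        rw [show ewnd nums 0 0 = [] by simp [ewnd]]
        exact outA_nil x hx
      · rw [if_neg hc]
  | succ t ih =>
    have ht' : t < nums.length := by omega
    rw [enum_take_succ nums t ht', List.foldl_append, ih (by omega)]
    show bodyA nums (κ : Int) x _ _ = _
    unfold bodyA
    simp only []
    rw [cnt_step nums κ t ht' hvals]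
    by_cases hskip : (t : Int) - (κ : Int) + 1 < 0
    · rw [if_pos hskip]
      rw [Prod.mk.injEq]
      constructor
      · rfl
      · apply List.map_congr_left
        intro m hm
        rw [if_neg (by omega), if_neg (by omega)]
    · rw [if_neg hskip]
      have hκt1 : κ ≤ t + 1 := by omega
      have hval : valAt nums κ x (t + 1 - κ) = outA (ewnd nums κ (t + 1)) x := by
        unfold valAt
        congr 2
        omega
      cases hres : innerGoA (hvec (ewnd nums κ (t + 1))) 0 0 x with
      | some v =>
        rw [Prod.mk.injEq]
        constructor
        · rfl
        · show (_ : List Int).set ((t : Int) - (κ : Int) + 1).toNat v = _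
          rw [show ((t : Int) - (κ : Int) + 1).toNat = t + 1 - κ by omega]
          have hm0R : t + 1 - κ < ((nums.length : Int) - (κ : Int) + 1).toNat := by omega
          rw [set_map_range _ _ _ _]
          apply List.map_congr_left
          intro m hm
          simp only [List.mem_range] at hm
          by_cases hmm : m = t + 1 - κ
          · subst hmm
            rw [if_pos rfl, if_pos (by omega)]
            rw [hval]
            unfold outA
            rw [hres]
          · rw [if_neg hmm]
            by_cases hle : m + κ ≤ t
            · rw [if_pos hle, if_pos (by omega)]
            · rw [if_neg hle, if_neg (by omega)]
      | none =>
        rw [Prod.mk.injEq]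
        constructor
        · rfl
        · apply List.map_congr_left
          intro m hm
          simp only [List.mem_range] at hm
          by_cases hmm : m = t + 1 - κ
          · subst hmm
            rw [if_neg (by omega), if_pos (by omega)]
            rw [hval]
            unfold outA
            rw [hres]
          · by_cases hle : m + κ ≤ t
            · rw [if_pos hle, if_pos (by omega)]
            · rw [if_neg hle, if_neg (by omega)]

lemma slice_nil (a b : Int) : PySem.List.slice ([] : List Int) (some a) (some b) = [] := by
  cases hs : PySem.List.slice ([] : List Int) (some a) (some b) with
  | nil => rfl
  | cons c t =>
    exfalso
    have := PySem.List.mem_of_mem_slice (x := c) (xs := ([] : List Int))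
      (a? := some a) (b? := some b) (by rw [hs]; exact List.mem_cons_self)
    simp at this

lemma foldA_res_nil (nums : List Int) (k x : Int) :
    ∀ (l : List (Int × Int)) (cnt : List Int),
      (l.foldl (bodyA nums k x) (cnt, ([] : List Int))).2 = [] := by
  intro l
  induction l with
  | nil => intro cnt; rfl
  | cons p l ih =>
    intro cnt
    rw [List.foldl_cons]
    have h2 : (bodyA nums k x (cnt, ([] : List Int)) p).2 = [] := by
      unfold bodyA
      by_cases hski : p.1 - k + 1 < 0
      · rw [if_pos hski]
      · rw [if_neg hski]
        cases innerGoA _ 0 0 x with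
        | some v => rfl
        | none => rfl
    rcases hb : bodyA nums k x (cnt, ([] : List Int)) p with ⟨c2, r2⟩
    have hr2 : r2 = [] := by rw [hb] at h2; exact h2
    subst hr2
    exact ih c2

lemma main_eq (nums : List Int) (k x : Int)
    (hx1 : 1 ≤ x ∨ (nums.length : Int) < k) (hk : 0 ≤ k ∨ nums = [])
    (hvals : ∀ v ∈ nums, -50 ≤ v) :
    getSubarrayBeauty nums k x = getSubarrayBeauty_alt nums k x := by
  by_cases hbig : (nums.length : Int) - k + 1 ≤ 0
  · -- no window at all: both sides are []
    unfold getSubarrayBeauty getSubarrayBeauty_alt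
    rw [show ((nums.length : Int) - k + 1).toNat = 0 by omega]
    rw [List.replicate_zero, foldA_res_nil]
    rw [PySem.List.pyRange_one_eq_nil (by omega)]
    rfl
  have hx : 1 ≤ x := by rcases hx1 with h | h <;> omega
  rcases hk with hk | hnil
  · -- 0 ≤ k
    have hkκ : k = (k.toNat : Int) := (Int.toNat_of_nonneg hk).symm
    rw [hkκ]
    set κ := k.toNat with hκ
    unfold getSubarrayBeauty
    have henum : (PySem.List.enumerate nums 0) = (PySem.List.enumerate nums 0).take nums.length := by
      rw [← PySem.List.length_enumerate nums 0, List.take_length]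
    rw [show (PySem.List.enumerate nums) = (PySem.List.enumerate nums 0) from rfl, henum]
    rw [foldA_inv nums κ x hx hvals nums.length le_rfl]
    unfold getSubarrayBeauty_alt
    rw [PySem.List.pyRange_one]
    rw [show ((nums.length : Int) - (κ : Int) + 1 - 0) = ((nums.length : Int) - (κ : Int) + 1) by ring]
    rw [List.map_map]
    apply List.map_congr_left
    intro m hm
    simp only [List.mem_range] at hm
    have hmR : (m : Int) < (nums.length : Int) - (κ : Int) + 1 := by omega
    rw [if_pos (by omega)]
    show valAt nums κ x m = _
    simp only [Function.comp]
    rw [show (0 : Int) + (m : Int) = ((m : Int)) by ring]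
    rw [show ((m : Int) + (κ : Int)) = (((m + κ : Nat) : Int)) by push_cast; ring]
    rw [PySem.List.slice_natCast, show m + κ - m = κ by omega]
    have hwnd : ewnd nums κ (m + κ) = (nums.drop m).take κ := by
      unfold ewnd
      rw [Nat.add_sub_cancel, List.drop_take, show m + κ - m = κ by omega]
    have hw : ∀ v ∈ ewnd nums κ (m + κ), -50 ≤ v := by
      intro v hv
      apply hvals
      exact List.mem_of_mem_take (List.mem_of_mem_drop (by unfold ewnd at hv; exact hv))
    unfold valAt
    rw [outA_eq _ x hx hw, hwnd]
    rfl
  · -- empty list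
    subst hnil
    unfold getSubarrayBeauty getSubarrayBeauty_alt
    rw [PySem.List.enumerate_nil]
    simp only [List.foldl_nil]
    rw [PySem.List.pyRange_one]
    show List.replicate ((0 : Int) - k + 1).toNat 0 = _
    symm
    rw [List.eq_replicate_iff]
    constructor
    · simp
    · intro b hb
      rw [List.mem_map] at hb
      obtain ⟨i, hi, rfl⟩ := hb
      rw [List.mem_map] at hi
      obtain ⟨j, hj, rfl⟩ := hi
      rw [slice_nil]
      simp only [List.filter_nil]
      rw [show PySem.List.sorted ([] : List Int) (fun v => v) false = [] from rfl]
      rw [if_neg (by simp; omega)]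

-- ===== VERDICT (by name: the statement is the Claim_ definition above) =====
theorem getSubarrayBeauty_spec : Claim_equal_getSubarrayBeauty := by
  intro nums k x _hdom hpre
  obtain ⟨hx1, hk, hvals⟩ := hpre
  unfold Spec_getSubarrayBeauty
  exact main_eq nums k x hx1 hk hvals
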